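-- pv_equiv track=rewrite | github.com/nemesgyadam/FacebookProfiler | src/web/analyzers/ad_preferences.py | _categorize_single_interest
-- ===== SOURCE A (Python) =====
-- def _categorize_single_interest(interest: str) -> str:
--     """Categorize a single interest into psychological categories."""
--     interest_lower = interest.lower()
--
--     tech_keywords = ['computer', 'software', 'gaming', 'tech', 'digital', 'internet', 'app']
--     entertainment_keywords = ['music', 'movie', 'tv', 'show', 'entertainment', 'comedy', 'drama']
--     health_keywords = ['health', 'fitness', 'medical', 'wellness', 'diet', 'exercise']
--     business_keywords = ['business', 'marketing', 'finance', 'professional', 'work', 'career']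
--     arts_keywords = ['art', 'culture', 'museum', 'literature', 'book', 'writing', 'design']
--     sports_keywords = ['sport', 'football', 'basketball', 'soccer', 'tennis', 'running']
--     food_keywords = ['food', 'cooking', 'restaurant', 'cuisine', 'recipe', 'dining']
--
--     if any(keyword in interest_lower for keyword in tech_keywords):
--         return 'Technology & Gaming'
--     elif any(keyword in interest_lower for keyword in entertainment_keywords):
--         return 'Entertainment & Media'
--     elif any(keyword in interest_lower for keyword in health_keywords):
--         return 'Health & Lifestyle'
--     elif any(keyword in interest_lower for keyword in business_keywords):
--         return 'Business & Professional'
--     elif any(keyword in interest_lower for keyword in arts_keywords):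
--         return 'Arts & Culture'
--     elif any(keyword in interest_lower for keyword in sports_keywords):
--         return 'Sports & Recreation'
--     elif any(keyword in interest_lower for keyword in food_keywords):
--         return 'Food & Dining'
--     else:
--         return 'Other'
-- ===== SOURCE B (Python) =====
-- _LABELS = ['Technology & Gaming', 'Entertainment & Media', 'Health & Lifestyle',
--            'Business & Professional', 'Arts & Culture', 'Sports & Recreation',
--            'Food & Dining']
--
-- _GROUPS = [
--     ['computer', 'software', 'gaming', 'tech', 'digital', 'internet', 'app'],
--     ['music', 'movie', 'tv', 'show', 'entertainment', 'comedy', 'drama'],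
--     ['health', 'fitness', 'medical', 'wellness', 'diet', 'exercise'],
--     ['business', 'marketing', 'finance', 'professional', 'work', 'career'],
--     ['art', 'culture', 'museum', 'literature', 'book', 'writing', 'design'],
--     ['sport', 'football', 'basketball', 'soccer', 'tennis', 'running'],
--     ['food', 'cooking', 'restaurant', 'cuisine', 'recipe', 'dining'],
-- ]
--
-- # one flat (keyword, rank) index, built once
-- _RANKED = [(kw, rank) for rank, kws in enumerate(_GROUPS) for kw in kws]
--
--
-- def _categorize_single_interest(interest: str) -> str:
--     """Single accumulator pass: keep the minimum category rank among all
--     matching keywords, then look the label up (rank 7 = no match = 'Other')."""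
--     lo = interest.lower()
--     best = len(_LABELS)
--     for kw, rank in _RANKED:
--         if kw in lo and rank < best:
--             best = rank
--     return (_LABELS + ['Other'])[best]
-- ===== Notes on version B (the rewrite author's own statement) =====
-- stated objective: alternative
-- what changed: Replaced the seven-branch elif cascade of any() tests with one flat keyword->rank index scanned in a single accumulator pass that keeps the minimum matching category rank, followed by a label-table lookup.
import Mathlib
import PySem

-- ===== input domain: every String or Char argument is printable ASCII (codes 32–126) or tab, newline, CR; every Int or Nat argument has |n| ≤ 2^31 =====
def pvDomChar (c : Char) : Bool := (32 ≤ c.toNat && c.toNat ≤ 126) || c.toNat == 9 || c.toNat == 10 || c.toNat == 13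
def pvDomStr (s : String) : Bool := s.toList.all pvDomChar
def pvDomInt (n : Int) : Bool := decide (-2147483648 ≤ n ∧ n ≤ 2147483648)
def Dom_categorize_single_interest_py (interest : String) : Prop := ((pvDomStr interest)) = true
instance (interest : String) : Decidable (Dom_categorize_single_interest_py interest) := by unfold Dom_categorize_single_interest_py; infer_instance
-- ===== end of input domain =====

-- B replaces A's seven-branch elif cascade by one flat keyword→rank index scanned in a
-- single min-accumulator pass plus a label lookup (objective: alternative, same cost).

-- ===== PORT A =====
def categorize_single_interest_py (interest : String) : String :=
  let interest_lower := PySem.Str.lower interest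
  let tech_keywords := ["computer", "software", "gaming", "tech", "digital", "internet", "app"]
  let entertainment_keywords := ["music", "movie", "tv", "show", "entertainment", "comedy", "drama"]
  let health_keywords := ["health", "fitness", "medical", "wellness", "diet", "exercise"]
  let business_keywords := ["business", "marketing", "finance", "professional", "work", "career"]
  let arts_keywords := ["art", "culture", "museum", "literature", "book", "writing", "design"]
  let sports_keywords := ["sport", "football", "basketball", "soccer", "tennis", "running"]
  let food_keywords := ["food", "cooking", "restaurant", "cuisine", "recipe", "dining"]
  if tech_keywords.any (fun keyword => PySem.Str.isIn keyword interest_lower) then "Technology & Gaming"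
  else if entertainment_keywords.any (fun keyword => PySem.Str.isIn keyword interest_lower) then "Entertainment & Media"
  else if health_keywords.any (fun keyword => PySem.Str.isIn keyword interest_lower) then "Health & Lifestyle"
  else if business_keywords.any (fun keyword => PySem.Str.isIn keyword interest_lower) then "Business & Professional"
  else if arts_keywords.any (fun keyword => PySem.Str.isIn keyword interest_lower) then "Arts & Culture"
  else if sports_keywords.any (fun keyword => PySem.Str.isIn keyword interest_lower) then "Sports & Recreation"
  else if food_keywords.any (fun keyword => PySem.Str.isIn keyword interest_lower) then "Food & Dining"
  else "Other"

-- ===== PORT B =====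
def pvLabels : List String :=
  ["Technology & Gaming", "Entertainment & Media", "Health & Lifestyle",
   "Business & Professional", "Arts & Culture", "Sports & Recreation", "Food & Dining"]

def pvGroups : List (List String) :=
  [["computer", "software", "gaming", "tech", "digital", "internet", "app"],
   ["music", "movie", "tv", "show", "entertainment", "comedy", "drama"],
   ["health", "fitness", "medical", "wellness", "diet", "exercise"],
   ["business", "marketing", "finance", "professional", "work", "career"],
   ["art", "culture", "museum", "literature", "book", "writing", "design"],
   ["sport", "football", "basketball", "soccer", "tennis", "running"],
   ["food", "cooking", "restaurant", "cuisine", "recipe", "dining"]]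

-- _RANKED = [(kw, rank) for rank, kws in enumerate(_GROUPS) for kw in kws]
def pvRanked : List (String × Int) :=
  (PySem.List.enumerate pvGroups 0).flatMap (fun p => p.2.map (fun kw => (kw, p.1)))

def categorize_single_interest_py_alt (interest : String) : String :=
  let lo := PySem.Str.lower interest
  let best : Int := pvRanked.foldl
    (fun acc p => if PySem.Str.isIn p.1 lo ∧ p.2 < acc then p.2 else acc) 7
  -- best is always in 0..7, so the Python index never raises; the default is unreachable
  PySem.List.pyGetD (pvLabels ++ ["Other"]) best ""

-- ===== PRECONDITION & SPEC =====
def Spec_categorize_single_interest_py (interest : String) (out : String) : Prop := out = categorize_single_interest_py_alt interest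
instance (interest : String) (out : String) : Decidable (Spec_categorize_single_interest_py interest out) := by unfold Spec_categorize_single_interest_py; infer_instance

-- ===== CLAIM (what is proved, stated in full; the proofs are below) =====
def Claim_equal_categorize_single_interest_py : Prop := ∀ (interest : String), Dom_categorize_single_interest_py interest → Spec_categorize_single_interest_py interest (categorize_single_interest_py interest)

-- ===== LEMMAS AND PROOFS =====

-- a whole keyword group with one shared rank folds to a single any-test
theorem pv_fold_group (lo : String) (kws : List String) (r acc : Int) :
    (kws.map (fun kw => (kw, r))).foldl
      (fun acc p => if PySem.Str.isIn p.1 lo ∧ p.2 < acc then p.2 else acc) acc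
    = if (kws.any (fun kw => PySem.Str.isIn kw lo)) ∧ r < acc then r else acc := by
  induction kws generalizing acc with
  | nil => simp
  | cons k ks ih =>
    simp only [List.map_cons, List.foldl_cons, ih, List.any_cons, Bool.or_eq_true]
    split_ifs <;> first | rfl | omega | tauto

-- the flat ranked index is the concatenation of the per-group maps
theorem pv_ranked_eq :
    pvRanked =
      ((["computer", "software", "gaming", "tech", "digital", "internet", "app"] : List String).map (fun kw => (kw, (0 : Int)))) ++
      ((["music", "movie", "tv", "show", "entertainment", "comedy", "drama"] : List String).map (fun kw => (kw, (1 : Int)))) ++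
      ((["health", "fitness", "medical", "wellness", "diet", "exercise"] : List String).map (fun kw => (kw, (2 : Int)))) ++
      ((["business", "marketing", "finance", "professional", "work", "career"] : List String).map (fun kw => (kw, (3 : Int)))) ++
      ((["art", "culture", "museum", "literature", "book", "writing", "design"] : List String).map (fun kw => (kw, (4 : Int)))) ++
      ((["sport", "football", "basketball", "soccer", "tennis", "running"] : List String).map (fun kw => (kw, (5 : Int)))) ++
      ((["food", "cooking", "restaurant", "cuisine", "recipe", "dining"] : List String).map (fun kw => (kw, (6 : Int)))) := by
  decide

-- ===== VERDICT (by name: the statement is the Claim_ definition above) =====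
theorem categorize_single_interest_py_spec : Claim_equal_categorize_single_interest_py := by
  intro interest _
  show categorize_single_interest_py interest = categorize_single_interest_py_alt interest
  unfold categorize_single_interest_py categorize_single_interest_py_alt
  rw [pv_ranked_eq]
  simp only [List.foldl_append, pv_fold_group]
  generalize (["computer", "software", "gaming", "tech", "digital", "internet", "app"] : List String).any (fun kw => PySem.Str.isIn kw (PySem.Str.lower interest)) = a0
  generalize (["music", "movie", "tv", "show", "entertainment", "comedy", "drama"] : List String).any (fun kw => PySem.Str.isIn kw (PySem.Str.lower interest)) = a1
  generalize (["health", "fitness", "medical", "wellness", "diet", "exercise"] : List String).any (fun kw => PySem.Str.isIn kw (PySem.Str.lower interest)) = a2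
  generalize (["business", "marketing", "finance", "professional", "work", "career"] : List String).any (fun kw => PySem.Str.isIn kw (PySem.Str.lower interest)) = a3
  generalize (["art", "culture", "museum", "literature", "book", "writing", "design"] : List String).any (fun kw => PySem.Str.isIn kw (PySem.Str.lower interest)) = a4
  generalize (["sport", "football", "basketball", "soccer", "tennis", "running"] : List String).any (fun kw => PySem.Str.isIn kw (PySem.Str.lower interest)) = a5
  generalize (["food", "cooking", "restaurant", "cuisine", "recipe", "dining"] : List String).any (fun kw => PySem.Str.isIn kw (PySem.Str.lower interest)) = a6
  revert a0 a1 a2 a3 a4 a5 a6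
  decide
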